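-- pv_equiv track=rewrite | github.com/jano31415/codejam | codeforces/goodbye2022/probb.py | solve
-- ===== SOURCE A (Python) =====
-- def solve(n,k):
--     l=[]
--     for i in range(n//2):
--         l.append(n-i)
--         l.append(i+1)
--     if len(l) < n:
--         l.append(n//2+1)
--     return " ".join([str(x) for x in l])
-- ===== SOURCE B (Python) =====
-- def solve(n, k):
--     return " ".join(str(n - j // 2 if j % 2 == 0 else j // 2 + 1) for j in range(n))
-- ===== Notes on version B (the rewrite author's own statement) =====
-- stated objective: simpler
-- what changed: Each output element is computed directly from its index by a closed-form formula in a single pass over range(n), replacing the half-length loop that appends two values per iteration plus the separate odd-length middle branch.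
import Mathlib
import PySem

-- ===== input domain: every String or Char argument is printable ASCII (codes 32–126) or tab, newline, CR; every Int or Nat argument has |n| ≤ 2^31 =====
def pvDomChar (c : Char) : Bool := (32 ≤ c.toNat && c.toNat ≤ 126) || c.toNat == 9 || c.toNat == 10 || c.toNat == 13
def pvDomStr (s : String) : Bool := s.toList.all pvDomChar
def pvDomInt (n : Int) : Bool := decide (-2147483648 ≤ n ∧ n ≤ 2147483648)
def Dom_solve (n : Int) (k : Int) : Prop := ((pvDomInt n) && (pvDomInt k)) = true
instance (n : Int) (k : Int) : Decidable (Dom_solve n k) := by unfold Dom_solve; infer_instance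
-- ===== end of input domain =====

-- B replaces A's half-length loop (two appends per iteration) plus the separate
-- odd-length middle branch by one pass over range(n) with a per-index closed form
-- (objective: simpler).

-- ===== PORT A =====
def solve (n : Int) (k : Int) : String :=
  let l : List Int :=
    (PySem.List.pyRange 0 (PySem.Int.floordiv n 2) 1).foldl
      (fun l i => (l ++ [n - i]) ++ [i + 1]) []
  let l' := if ((l.length : Int)) < n then l ++ [PySem.Int.floordiv n 2 + 1] else l
  PySem.Str.join " " (l'.map (fun x => PySem.Int.toStr x))

-- ===== PORT B =====
def solve_alt (n : Int) (k : Int) : String :=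
  PySem.Str.join " "
    ((PySem.List.pyRange 0 n 1).map (fun j =>
      PySem.Int.toStr (if PySem.Int.mod j 2 = 0 then n - PySem.Int.floordiv j 2
                       else PySem.Int.floordiv j 2 + 1)))

-- ===== PRECONDITION & SPEC =====
def Spec_solve (n : Int) (k : Int) (out : String) : Prop := out = solve_alt n k
instance (n : Int) (k : Int) (out : String) : Decidable (Spec_solve n k out) := by unfold Spec_solve; infer_instance

-- ===== CLAIM (what is proved, stated in full; the proofs are below) =====
def Claim_equal_solve : Prop := ∀ (n : Int) (k : Int), Dom_solve n k → Spec_solve n k (solve n k)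

-- ===== LEMMAS AND PROOFS =====

-- B's per-index formula at a natural index (n fixed)
def pvF (n : Int) (j : Nat) : Int :=
  if j % 2 = 0 then n - ((j / 2 : Nat) : Int) else ((j / 2 : Nat) : Int) + 1

-- the first 2*k indices of B's pass produce exactly A's k loop iterations
theorem pvPairs (n : Int) (k : Nat) :
    (List.range (2 * k)).map (pvF n) =
      (List.range k).flatMap (fun i : Nat => ([n - (i : Int), (i : Int) + 1] : List Int)) := by
  induction k with
  | zero => simp
  | succ k ih =>
    have h2 : 2 * (k + 1) = (2 * k + 1) + 1 := by omega
    rw [h2, List.range_succ, List.range_succ, List.range_succ, List.map_append,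
      List.map_append, List.flatMap_append, ih, List.append_assoc]
    have e1 : pvF n (2 * k) = n - (k : Int) := by
      simp [pvF, Nat.mul_mod_right]
    have e2 : pvF n (2 * k + 1) = (k : Int) + 1 := by
      have hm : (2 * k + 1) % 2 = 1 := by omega
      have hd : (2 * k + 1) / 2 = k := by omega
      simp [pvF, hm, hd]
    simp [e1, e2]

-- the Int lists the two ports join are equal
theorem pvLists (n : Int) :
    (let l : List Int :=
      (PySem.List.pyRange 0 (PySem.Int.floordiv n 2) 1).foldl
        (fun l i => (l ++ [n - i]) ++ [i + 1]) [];
     if ((l.length : Int)) < n then l ++ [PySem.Int.floordiv n 2 + 1] else l) =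
    (PySem.List.pyRange 0 n 1).map (fun j =>
      if PySem.Int.mod j 2 = 0 then n - PySem.Int.floordiv j 2
      else PySem.Int.floordiv j 2 + 1) := by
  by_cases hn : n ≤ 0
  · have hfd : PySem.Int.floordiv n 2 = n / 2 :=
      PySem.Int.floordiv_eq_ediv_of_pos (by omega)
    have h1 : PySem.List.pyRange 0 (PySem.Int.floordiv n 2) 1 = [] :=
      PySem.List.pyRange_one_eq_nil (by omega)
    have h2 : PySem.List.pyRange 0 n 1 = [] :=
      PySem.List.pyRange_one_eq_nil (by omega)
    rw [h1, h2]
    simp only [List.foldl_nil, List.length_nil, Int.natCast_zero, List.map_nil]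
    rw [if_neg (by omega)]
  · obtain ⟨m, rfl⟩ : ∃ m : Nat, n = (m : Int) := ⟨n.toNat, (Int.toNat_of_nonneg (by omega)).symm⟩
    have hfd : PySem.Int.floordiv (m : Int) 2 = ((m / 2 : Nat) : Int) := by
      exact_mod_cast PySem.Int.floordiv_natCast m 2
    have htn : (((m / 2 : Nat) : Int) - 0).toNat = m / 2 := by omega
    have hr1 : PySem.List.pyRange 0 ((m / 2 : Nat) : Int) 1 =
        (List.range (m / 2)).map (fun k : Nat => (k : Int)) := by
      rw [PySem.List.pyRange_one, htn]
      simp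
    have htn2 : (((m : Nat) : Int) - 0).toNat = m := by omega
    have hr2 : PySem.List.pyRange 0 (m : Int) 1 =
        (List.range m).map (fun k : Nat => (k : Int)) := by
      rw [PySem.List.pyRange_one, htn2]
      simp
    -- A's loop list equals the first 2*(m/2) indices of B's pass
    have hA : (PySem.List.pyRange 0 ((m / 2 : Nat) : Int) 1).foldl
        (fun l i => (l ++ [(m : Int) - i]) ++ [i + 1]) [] =
        (List.range (2 * (m / 2))).map (pvF m) := by
      rw [hr1, List.foldl_map, pvPairs]
      have := PySem.List.foldl_append_eq_flatMap
        (fun i : Nat => ([(m : Int) - (i : Int), (i : Int) + 1] : List Int)) (List.range (m / 2)) []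
      simpa using this
    -- B's list
    have hB : (PySem.List.pyRange 0 (m : Int) 1).map (fun j =>
        if PySem.Int.mod j 2 = 0 then (m : Int) - PySem.Int.floordiv j 2
        else PySem.Int.floordiv j 2 + 1) = (List.range m).map (pvF m) := by
      rw [hr2, List.map_map]
      refine List.map_congr_left ?_
      intro k _
      have h1 : PySem.Int.mod (k : Int) 2 = ((k % 2 : Nat) : Int) := by
        exact_mod_cast PySem.Int.mod_natCast k 2
      have h2 : PySem.Int.floordiv (k : Int) 2 = ((k / 2 : Nat) : Int) := by
        exact_mod_cast PySem.Int.floordiv_natCast k 2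
      simp only [Function.comp, h1, h2, pvF]
      rcases Nat.even_or_odd k with hk | hk
      · have hk0 : k % 2 = 0 := Nat.even_iff.mp hk
        simp [hk0]
      · have hk1 : k % 2 = 1 := Nat.odd_iff.mp hk
        simp [hk1]
    rw [hfd]
    rw [show ((PySem.List.pyRange 0 ((m / 2 : Nat) : Int) 1).foldl
        (fun l i => (l ++ [(m : Int) - i]) ++ [i + 1]) []) =
        (List.range (2 * (m / 2))).map (pvF m) from hA, hB]
    simp only [List.length_map, List.length_range]
    set q := m / 2 with hq
    rcases Nat.even_or_odd m with hm | hm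
    · have heq : 2 * q = m := by
        have := Nat.even_iff.mp hm; omega
      rw [heq, if_neg (by omega)]
    · have hodd : m % 2 = 1 := Nat.odd_iff.mp hm
      have hm' : m = 2 * q + 1 := by omega
      rw [if_pos (by push_cast; omega)]
      have hrange : List.range m = List.range (2 * q) ++ [2 * q] := by
        rw [hm']
        exact List.range_succ
      rw [hrange, List.map_append]
      congr 1
      have hmid : pvF (m : Int) (2 * q) = (m : Int) - (q : Int) := by
        simp [pvF, Nat.mul_mod_right]
      simp only [List.map_cons, List.map_nil, hmid]
      congr 1
      omega

-- the mapped string lists are equal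
theorem pvJoinArg (n : Int) :
    ((let l : List Int :=
        (PySem.List.pyRange 0 (PySem.Int.floordiv n 2) 1).foldl
          (fun l i => (l ++ [n - i]) ++ [i + 1]) [];
      if ((l.length : Int)) < n then l ++ [PySem.Int.floordiv n 2 + 1] else l).map
        (fun x => PySem.Int.toStr x)) =
    (PySem.List.pyRange 0 n 1).map (fun j =>
      PySem.Int.toStr (if PySem.Int.mod j 2 = 0 then n - PySem.Int.floordiv j 2
                       else PySem.Int.floordiv j 2 + 1)) := by
  rw [pvLists, List.map_map]
  rfl

-- ===== VERDICT (by name: the statement is the Claim_ definition above) =====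
theorem solve_spec : Claim_equal_solve := by
  intro n k _
  show solve n k = solve_alt n k
  exact congrArg (PySem.Str.join " ") (pvJoinArg n)
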